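-- pv_equiv track=rewrite | github.com/negarK2000/InformationRetrievalSystem | Phase2-1/InvertedIndex.py | index_positions
-- ===== SOURCE A (Python) =====
-- def index_positions(tokens):
--     file_index = {}
--     for index, word in enumerate(tokens):
--         if word in file_index.keys():
--             file_index[word].append(index)
--             file_index[word][0] += 1
--         else:
--             file_index[word] = [1]
--             file_index[word].append(index)
--
--     return file_index
-- ===== SOURCE B (Python) =====
-- def index_positions(tokens):
--     # per distinct word, scan the whole token list for its positions (no incremental dict maintenance)
--     result = {}
--     for word in dict.fromkeys(tokens):
--         positions = [i for i, t in enumerate(tokens) if t == word]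
--         result[word] = [len(positions)] + positions
--     return result
-- ===== Notes on version B (the rewrite author's own statement) =====
-- stated objective: alternative
-- what changed: Instead of A's single pass that maintains count-and-positions per word in a dict as it goes, B first computes the distinct words in first-occurrence order and then, for each word, rescans the whole token list to collect its positions, building each value as [len(positions)] + positions.
import Mathlib
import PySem

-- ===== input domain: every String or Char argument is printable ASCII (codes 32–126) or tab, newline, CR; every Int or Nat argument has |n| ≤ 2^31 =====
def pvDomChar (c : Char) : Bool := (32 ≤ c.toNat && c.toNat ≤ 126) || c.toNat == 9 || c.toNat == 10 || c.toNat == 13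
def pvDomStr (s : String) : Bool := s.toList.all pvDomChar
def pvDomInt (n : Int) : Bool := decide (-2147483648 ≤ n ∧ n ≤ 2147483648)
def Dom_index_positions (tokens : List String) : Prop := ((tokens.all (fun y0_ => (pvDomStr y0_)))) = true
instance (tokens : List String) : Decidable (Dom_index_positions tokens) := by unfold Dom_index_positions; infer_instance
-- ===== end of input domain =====

-- B drops A's incremental count-in-slot-0 dict maintenance: it lists the distinct words first and
-- then rescans the tokens once per word for its positions; objective: alternative decomposition.

-- ===== PORT A =====
-- file_index[word][0] += 1: Python raises IndexError on an empty list; that branch only runs on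
-- nonempty values, so the [] case of this helper is unreachable.
def pvBump (v : List Int) : List Int :=
  match v with
  | [] => []
  | c :: r => (c + 1) :: r

def index_positions (tokens : List String) : List (String × List Int) :=
  ((PySem.List.enumerate tokens).foldl
    (fun (d : PySem.Dict String (List Int)) (iw : Int × String) =>
      if d.contains iw.2 then
        -- file_index[word].append(index); file_index[word][0] += 1
        let d1 := d.modify iw.2 [] (fun v => v ++ [iw.1])
        d1.modify iw.2 [] pvBump
      else
        -- file_index[word] = [1]; file_index[word].append(index)
        let d1 := d.insert iw.2 [(1 : Int)]
        d1.modify iw.2 [] (fun v => v ++ [iw.1]))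
    PySem.Dict.empty).items

-- ===== PORT B =====
def index_positions_alt (tokens : List String) : List (String × List Int) :=
  ((PySem.List.dedup tokens).foldl
    (fun (d : PySem.Dict String (List Int)) (word : String) =>
      let positions := ((PySem.List.enumerate tokens).filter (fun p => p.2 == word)).map (·.1)
      d.insert word (((positions.length : Int)) :: positions))
    PySem.Dict.empty).items

-- ===== PRECONDITION & SPEC =====
def Spec_index_positions (tokens : List String) (out : List (String × List Int)) : Prop := out = index_positions_alt tokens
instance (tokens : List String) (out : List (String × List Int)) : Decidable (Spec_index_positions tokens out) := by unfold Spec_index_positions; infer_instance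

-- ===== CLAIM (what is proved, stated in full; the proofs are below) =====
def Claim_equal_index_positions : Prop := ∀ (tokens : List String), Dom_index_positions tokens → Spec_index_positions tokens (index_positions tokens)

-- ===== LEMMAS AND PROOFS =====

-- positions of word w in tokens
def pvPos (tokens : List String) (w : String) : List Int :=
  ((PySem.List.enumerate tokens).filter (fun p => p.2 == w)).map (·.1)

-- the value reshape: positions ↦ [count] ++ positions
def pvVmap (v : List Int) : List Int := ((v.length : Int) :: v)

-- B's grouping dict, reshaped entry-by-entry
def pvMapd (g : PySem.Dict String (List Int)) : PySem.Dict String (List Int) :=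
  PySem.Dict.mk (g.items.map (fun p => (p.1, pvVmap p.2)))

-- the plain grouping fold (collects only positions per word)
def pvGroup (tokens : List String) : PySem.Dict String (List Int) :=
  (PySem.List.enumerate tokens).foldl
    (fun g iw => g.modify iw.2 [] (fun ps => ps ++ [iw.1])) PySem.Dict.empty

theorem pvMapd_contains (g : PySem.Dict String (List Int)) (w : String) :
    (pvMapd g).contains w = g.contains w := by
  simp [pvMapd, PySem.Dict.contains, List.any_map, Function.comp_def]

theorem pvMapd_get? (g : PySem.Dict String (List Int)) (w : String) :
    (pvMapd g).get? w = (g.get? w).map pvVmap := by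
  obtain ⟨l⟩ := g
  induction l with
  | nil => simp [pvMapd, PySem.Dict.get?]
  | cons p rest ih =>
    obtain ⟨k, v⟩ := p
    have h := ih
    simp only [pvMapd, List.map_cons] at h ⊢
    rw [PySem.Dict.get?_mk_cons, PySem.Dict.get?_mk_cons]
    by_cases hk : k == w
    · simp [hk]
    · simp only [hk, if_neg, Bool.false_eq_true, not_false_eq_true]
      exact h

theorem pvMapd_insert (g : PySem.Dict String (List Int)) (w : String) (v : List Int) :
    pvMapd (g.insert w v) = (pvMapd g).insert w (pvVmap v) := by
  simp only [PySem.Dict.insert, pvMapd_contains]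
  by_cases hc : g.contains w = true
  · simp only [hc, if_true, pvMapd, List.map_map]
    congr 1
    apply List.map_congr_left
    intro p _
    by_cases hp : p.1 == w <;> simp [hp, Function.comp]
  · simp [hc, pvMapd]

-- one step of A's fold matches one step of the grouping fold through pvMapd
theorem pvStep_eq (g : PySem.Dict String (List Int)) (iw : Int × String) :
    (if (pvMapd g).contains iw.2 then
        ((pvMapd g).modify iw.2 [] (fun v => v ++ [iw.1])).modify iw.2 [] pvBump
      else
        ((pvMapd g).insert iw.2 [(1 : Int)]).modify iw.2 [] (fun v => v ++ [iw.1]))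
      = pvMapd (g.modify iw.2 [] (fun ps => ps ++ [iw.1])) := by
  rw [pvMapd_contains]
  by_cases hc : g.contains iw.2 = true
  · have hsome : (g.get? iw.2).isSome := by
      rw [← PySem.Dict.contains_eq_isSome_get?]; exact hc
    obtain ⟨v, hv⟩ := Option.isSome_iff_exists.mp hsome
    simp only [hc, if_true, PySem.Dict.modify, PySem.Dict.getD_eq_get?_getD,
      PySem.Dict.get?_insert_self, pvMapd_get?, hv, Option.map_some, Option.getD_some,
      PySem.Dict.insert_insert_self, pvMapd_insert]
    congr 1
    simp [pvVmap, pvBump]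
  · simp only [hc, PySem.Dict.modify, PySem.Dict.getD_eq_get?_getD,
      PySem.Dict.get?_insert_self, Option.getD_some, PySem.Dict.insert_insert_self,
      pvMapd_insert]
    have hg : g.get? iw.2 = none := by
      rw [← Option.not_isSome_iff_eq_none, ← PySem.Dict.contains_eq_isSome_get?]
      simp [hc]
    rw [pvMapd_get?, hg]
    rfl

theorem pvFold_eq (l : List (Int × String)) (g : PySem.Dict String (List Int)) :
    l.foldl
      (fun (d : PySem.Dict String (List Int)) (iw : Int × String) =>
        if d.contains iw.2 then
          ((d.modify iw.2 [] (fun v => v ++ [iw.1])).modify iw.2 [] pvBump)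
        else
          ((d.insert iw.2 [(1 : Int)]).modify iw.2 [] (fun v => v ++ [iw.1])))
      (pvMapd g)
    = pvMapd (l.foldl (fun g iw => g.modify iw.2 [] (fun ps => ps ++ [iw.1])) g) := by
  induction l generalizing g with
  | nil => rfl
  | cons p t ih =>
    simp only [List.foldl_cons]
    rw [pvStep_eq g p]
    exact ih _

-- keys of the grouping dict: the distinct words in first-occurrence order
theorem pvGroup_keys (tokens : List String) :
    (pvGroup tokens).keys = PySem.Set.ofList tokens := by
  unfold pvGroup
  rw [PySem.Dict.keys_foldl_modify_key (key := fun iw : Int × String => iw.2)]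
  simp [PySem.List.map_snd_enumerate, PySem.Set.update, PySem.Set.ofList_eq_foldl]

-- value of the grouping dict at any word: its positions
theorem pvGroup_getD (tokens : List String) (w : String) :
    (pvGroup tokens).getD w [] = pvPos tokens w := by
  unfold pvGroup pvPos
  have hswap : (PySem.List.enumerate tokens).foldl
      (fun (g : PySem.Dict String (List Int)) iw => g.modify iw.2 [] (fun ps => ps ++ [iw.1]))
      PySem.Dict.empty
      = ((PySem.List.enumerate tokens).map Prod.swap).foldl
      (fun (g : PySem.Dict String (List Int)) p => g.modify p.1 [] (fun ps => ps ++ [p.2]))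
      PySem.Dict.empty := by
    rw [List.foldl_map]; rfl
  rw [hswap, PySem.Dict.getD_foldl_modify_append]
  simp [List.filter_map, List.map_map, Function.comp_def, Prod.swap]

-- ===== VERDICT (by name: the statement is the Claim_ definition above) =====
theorem index_positions_spec : Claim_equal_index_positions := by
  intro tokens _
  unfold Spec_index_positions index_positions index_positions_alt
  -- A's fold is the reshaped grouping fold
  have hA := pvFold_eq (PySem.List.enumerate tokens) PySem.Dict.empty
  have hempty : pvMapd PySem.Dict.empty = PySem.Dict.empty := rfl
  rw [hempty] at hA
  rw [hA]
  -- B's fold inserts fresh distinct keys, so its items are the mapped dedup list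
  have hnodup : (PySem.List.dedup tokens).Nodup := by
    exact PySem.List.nodup_dedup tokens
  have hB : ((PySem.List.dedup tokens).foldl
      (fun (d : PySem.Dict String (List Int)) (word : String) =>
        let positions := ((PySem.List.enumerate tokens).filter (fun p => p.2 == word)).map (·.1)
        d.insert word (((positions.length : Int)) :: positions))
      PySem.Dict.empty).items
      = (PySem.List.dedup tokens).map (fun w => (w, pvVmap (pvPos tokens w))) := by
    have h := PySem.Dict.items_foldl_insert_fresh (l := PySem.List.dedup tokens)
      (k := fun w => w) (v := fun w => pvVmap (pvPos tokens w)) (d := PySem.Dict.empty)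
      (by intro a _; simp [PySem.Dict.contains_empty]) (by simp)
    simpa [pvVmap, pvPos] using h
  rw [hB]
  -- A's items: map over keys of the grouping dict
  have hknd : (pvGroup tokens).keys.Nodup := by
    rw [pvGroup_keys]; exact PySem.Set.nodup_ofList tokens
  rw [show ((PySem.List.enumerate tokens).foldl
        (fun g iw => g.modify iw.2 [] (fun ps => ps ++ [iw.1])) PySem.Dict.empty)
      = pvGroup tokens from rfl]
  have hkeysMapd : (pvMapd (pvGroup tokens)).keys = (pvGroup tokens).keys := by
    simp [pvMapd, PySem.Dict.keys, List.map_map, Function.comp_def]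
  rw [PySem.Dict.items_eq_map_keys (pvMapd (pvGroup tokens))
      (by rw [hkeysMapd]; exact hknd) []]
  rw [hkeysMapd, pvGroup_keys]
  have hdedup : PySem.Set.ofList tokens = PySem.List.dedup tokens := by simp
  rw [hdedup]
  apply List.map_congr_left
  intro k hk
  have hmemkeys : k ∈ (pvGroup tokens).keys := by
    rw [pvGroup_keys, hdedup]; exact hk
  have hc : (pvGroup tokens).contains k = true :=
    (PySem.Dict.contains_iff_mem_keys _ _).mpr hmemkeys
  have hsome : ((pvGroup tokens).get? k).isSome := by
    rw [← PySem.Dict.contains_eq_isSome_get?]; exact hc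
  obtain ⟨v, hv⟩ := Option.isSome_iff_exists.mp hsome
  have hval : v = pvPos tokens k := by
    have := pvGroup_getD tokens k
    rw [PySem.Dict.getD_eq_get?_getD, hv] at this
    simpa using this
  have : (pvMapd (pvGroup tokens)).getD k [] = pvVmap (pvPos tokens k) := by
    rw [PySem.Dict.getD_eq_get?_getD, pvMapd_get?, hv, hval]
    rfl
  rw [this]
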